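-- pv_equiv track=rewrite | github.com/lhj-3/coding_test_pre | 모의고사.py | solution
-- ===== SOURCE A (Python) =====
-- def solution(answers):
--     aws = []
--     one = [1, 2, 3, 4, 5]
--     two = [2, 1, 2, 3, 2, 4, 2, 5]
--     three = [3, 3, 1, 1, 2, 2, 4, 4, 5, 5]
--
--     one_acc = 0
--     two_acc = 0
--     three_acc = 0
--
--     for i in range(len(answers)):
--         if answers[i] == one[i%5]:
--             one_acc += 1
--         if answers[i] == two[i%8]:
--             two_acc += 1
--         if answers[i] == three[i%10]:
--             three_acc += 1
--
--     total_acc = [one_acc, two_acc, three_acc]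
--     max_value = max(total_acc)
--
--     for i in range(3):
--         if max_value == total_acc[i]:
--             aws.append(i+1)
--     return aws
-- ===== SOURCE B (Python) =====
-- def solution(answers):
--     def score(p):
--         # consume answers block-by-block: each while-iteration scores one
--         # pattern-length block against p via zip (which truncates), then
--         # drops the block; no index arithmetic, no modular indexing.
--         s = 0
--         rest = answers
--         while rest:
--             s += sum(x == y for x, y in zip(rest, p))
--             rest = rest[len(p):]
--         return s
--
--     patterns = [[1, 2, 3, 4, 5],
--                 [2, 1, 2, 3, 2, 4, 2, 5],
--                 [3, 3, 1, 1, 2, 2, 4, 4, 5, 5]]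
--     scores = [score(p) for p in patterns]
--     m = max(scores)
--     return [i + 1 for i, s in enumerate(scores) if s == m]
-- ===== Notes on version B (the rewrite author's own statement) =====
-- stated objective: alternative
-- what changed: A walks indices once with i%5/i%8/i%10 lookups feeding three parallel accumulators; B instead consumes the answer list block-by-block per pattern (zip a pattern-length block against the pattern, drop it, repeat), so all modular index arithmetic disappears, then picks winners from the score list.
import Mathlib
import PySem

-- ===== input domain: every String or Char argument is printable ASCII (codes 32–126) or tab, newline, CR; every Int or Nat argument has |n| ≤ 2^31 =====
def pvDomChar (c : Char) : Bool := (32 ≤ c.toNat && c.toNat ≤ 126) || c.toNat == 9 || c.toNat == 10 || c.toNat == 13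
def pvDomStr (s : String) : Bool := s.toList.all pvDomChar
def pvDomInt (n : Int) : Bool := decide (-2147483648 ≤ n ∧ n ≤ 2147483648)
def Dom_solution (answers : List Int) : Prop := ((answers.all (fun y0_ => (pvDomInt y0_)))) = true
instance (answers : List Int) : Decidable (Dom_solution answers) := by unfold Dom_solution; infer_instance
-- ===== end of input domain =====

-- B replaces A's single index loop with modular pattern lookups (i%5/i%8/i%10, three parallel accumulators) by per-pattern block-wise consumption of the list (zip a pattern-length block against the pattern, drop it, repeat) plus a winner pass; alternative decomposition, same cost.


-- ===== PORT A =====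
def solution (answers : List Int) : List Int :=
  let one : List Int := [1, 2, 3, 4, 5]
  let two : List Int := [2, 1, 2, 3, 2, 4, 2, 5]
  let three : List Int := [3, 3, 1, 1, 2, 2, 4, 4, 5, 5]
  -- for i in range(len(answers)): three independent accumulators (answers[i] is always in range)
  let accs : Int × Int × Int :=
    (PySem.List.pyRange 0 (answers.length : Int) 1).foldl
      (fun (s : Int × Int × Int) i =>
        (if PySem.List.pyGetD answers i 0 = PySem.List.pyGetD one (PySem.Int.mod i 5) 0 then s.1 + 1 else s.1,
         if PySem.List.pyGetD answers i 0 = PySem.List.pyGetD two (PySem.Int.mod i 8) 0 then s.2.1 + 1 else s.2.1,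
         if PySem.List.pyGetD answers i 0 = PySem.List.pyGetD three (PySem.Int.mod i 10) 0 then s.2.2 + 1 else s.2.2))
      (0, 0, 0)
  let total_acc : List Int := [accs.1, accs.2.1, accs.2.2]
  let max_value : Int := ((PySem.List.max? total_acc (fun x => x)).getD 0)  -- total_acc is nonempty, max never raises
  (PySem.List.pyRange 0 3 1).foldl
    (fun aws i => if max_value = PySem.List.pyGetD total_acc i 0 then aws ++ [i + 1] else aws) []

-- ===== PORT B =====
-- the 'while rest:' loop of Source B's score helper; the fuel argument (answers.length + 1)
-- only makes the same computation total: each iteration drops at least one element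
def pvChunkScore (p : List Int) : Nat → List Int → Int
  | 0, _ => 0
  | fuel + 1, rest =>
    if rest = [] then 0
    else
      ((rest.zip p).map (fun xy => if xy.1 = xy.2 then (1 : Int) else 0)).sum
        + pvChunkScore p fuel (PySem.List.slice rest (some (p.length : Int)) none)

def solution_alt (answers : List Int) : List Int :=
  let patterns : List (List Int) :=
    [[1, 2, 3, 4, 5], [2, 1, 2, 3, 2, 4, 2, 5], [3, 3, 1, 1, 2, 2, 4, 4, 5, 5]]
  let scores : List Int := patterns.map (fun p => pvChunkScore p (answers.length + 1) answers)
  let m : Int := ((PySem.List.max? scores (fun x => x)).getD 0)  -- scores has three entries, max never raises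
  (PySem.List.enumerate scores 0).foldl
    (fun aws is => if is.2 = m then aws ++ [is.1 + 1] else aws) []

-- ===== PRECONDITION & SPEC =====
def Spec_solution (answers : List Int) (out : List Int) : Prop := out = solution_alt answers
instance (answers : List Int) (out : List Int) : Decidable (Spec_solution answers out) := by unfold Spec_solution; infer_instance

-- ===== CLAIM (what is proved, stated in full; the proofs are below) =====
def Claim_equal_solution : Prop := ∀ (answers : List Int), Dom_solution answers → Spec_solution answers (solution answers)

-- ===== LEMMAS AND PROOFS =====

-- a block's zip-sum counts index-wise matches up to the shorter length
theorem pvZipSum_eq_countP (xs ys : List Int) :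
    ((xs.zip ys).map (fun xy => if xy.1 = xy.2 then (1 : Int) else 0)).sum
      = ((List.range (min xs.length ys.length)).countP
          (fun j => decide (xs.getD j 0 = ys.getD j 0)) : Int) := by
  induction xs generalizing ys with
  | nil => simp
  | cons a xs ih =>
    cases ys with
    | nil => simp
    | cons b ys =>
      have hmin : min (a :: xs).length (b :: ys).length = (min xs.length ys.length) + 1 := by
        simp [Nat.succ_min_succ]
      rw [hmin, List.range_succ_eq_map]
      simp only [List.zip_cons_cons, List.map_cons, List.sum_cons, List.countP_cons,
        List.countP_map]
      rw [ih ys]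
      simp only [List.getD_cons_zero, List.getD_cons_succ, Function.comp_def]
      split <;> simp_all [add_comm]

-- the index-wise match count satisfies the block recursion B performs
theorem pvCnt_chunk (p ans : List Int) (hp : p ≠ []) :
    ((List.range ans.length).countP
        (fun j => decide (ans.getD j 0 = p.getD (j % p.length) 0)) : Nat)
      = (List.range (min ans.length p.length)).countP
          (fun j => decide (ans.getD j 0 = p.getD j 0))
        + (List.range (ans.drop p.length).length).countP
            (fun j => decide ((ans.drop p.length).getD j 0 = p.getD (j % p.length) 0)) := by
  set k := p.length with hk
  have hk0 : 0 < k := List.length_pos_iff.mpr hp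
  by_cases h : k ≤ ans.length
  · have hsplit : ans.length = k + (ans.length - k) := by omega
    rw [hsplit, List.range_add, List.countP_append, List.countP_map]
    congr 1
    · -- first block: j < k so j % k = j
      rw [min_eq_right (by omega)]
      apply List.countP_congr
      intro j hj
      rw [List.mem_range] at hj
      rw [Nat.mod_eq_of_lt hj]
    · -- shifted tail: index k + j in ans is index j in ans.drop k
      rw [List.length_drop]
      apply List.countP_congr
      intro j hj
      rw [List.mem_range] at hj
      have h2 : (k + j) % k = j % k := Nat.add_mod_left k j
      simp [h2]
  · -- fewer answers than pattern entries: single truncated block, empty tail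
    have hdrop : ans.drop k = [] := List.drop_eq_nil_iff.mpr (by omega)
    rw [hdrop, min_eq_left (by omega)]
    simp only [List.length_nil, List.range_zero, List.countP_nil, Nat.add_zero]
    apply List.countP_congr
    intro j hj
    rw [List.mem_range] at hj
    rw [Nat.mod_eq_of_lt (by omega)]

-- B's while-loop equals the index-wise match count
theorem pvChunkScore_eq (p : List Int) (hp : p ≠ []) (fuel : Nat) (ans : List Int)
    (hf : ans.length < fuel) :
    pvChunkScore p fuel ans
      = ((List.range ans.length).countP
          (fun j => decide (ans.getD j 0 = p.getD (j % p.length) 0)) : Int) := by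
  induction fuel generalizing ans with
  | zero => omega
  | succ fuel ih =>
    rw [pvChunkScore]
    by_cases hnil : ans = []
    · simp [hnil]
    · simp only [hnil, if_false]
      have hk0 : 0 < p.length := List.length_pos_iff.mpr hp
      have hlen : (PySem.List.slice ans (some (p.length : Int)) none).length < fuel := by
        rw [PySem.List.slice_from_natCast, List.length_drop]
        have : 0 < ans.length := List.length_pos_iff.mpr hnil
        omega
      rw [ih _ hlen, PySem.List.slice_from_natCast, pvZipSum_eq_countP,
        pvCnt_chunk p ans hp]
      push_cast
      ring

-- A's accumulator for pattern p, written as the same countP over List.range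
theorem pvFoldA_eq (p ans : List Int) (k : Int) (hkk : k = (p.length : Int)) :
    (PySem.List.pyRange 0 (ans.length : Int) 1).foldl
        (fun acc i => if PySem.List.pyGetD ans i 0
            = PySem.List.pyGetD p (PySem.Int.mod i k) 0 then acc + 1 else acc) 0
      = ((List.range ans.length).countP
          (fun j => decide (ans.getD j 0 = p.getD (j % p.length) 0)) : Int) := by
  subst hkk
  rw [PySem.List.foldl_ite_add_one, PySem.List.pyRange_one]
  simp only [List.countP_map, zero_add, Int.sub_zero, Int.toNat_natCast]
  congr 1
  apply List.countP_congr
  intro j _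
  simp only [Function.comp_def, PySem.Int.mod_natCast, PySem.List.pyGetD_natCast]

-- small evaluation facts for the three-entry winner pass
theorem pvGetD_three_zero (a b c : Int) : PySem.List.pyGetD [a, b, c] 0 0 = a := rfl
theorem pvGetD_three_one (a b c : Int) : PySem.List.pyGetD [a, b, c] 1 0 = b := rfl
theorem pvGetD_three_two (a b c : Int) : PySem.List.pyGetD [a, b, c] 2 0 = c := rfl
theorem pvEnumerate_three (a b c : Int) : PySem.List.enumerate [a, b, c] 0 = [(0, a), (1, b), (2, c)] := rfl

-- ===== VERDICT (by name: the statement is the Claim_ definition above) =====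
set_option maxHeartbeats 1000000 in
theorem solution_spec : Claim_equal_solution := by
  intro answers _
  show solution answers = solution_alt answers
  unfold solution solution_alt
  simp only [List.map_cons, List.map_nil]
  rw [PySem.List.foldl_prod_mk
      (f := fun acc i => if PySem.List.pyGetD answers i 0 = PySem.List.pyGetD ([1,2,3,4,5] : List Int) (PySem.Int.mod i 5) 0 then acc + 1 else acc)
      (g := fun (s : Int × Int) i =>
        (if PySem.List.pyGetD answers i 0 = PySem.List.pyGetD ([2,1,2,3,2,4,2,5] : List Int) (PySem.Int.mod i 8) 0 then s.1 + 1 else s.1,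
         if PySem.List.pyGetD answers i 0 = PySem.List.pyGetD ([3,3,1,1,2,2,4,4,5,5] : List Int) (PySem.Int.mod i 10) 0 then s.2 + 1 else s.2)),
    PySem.List.foldl_prod_mk
      (f := fun acc i => if PySem.List.pyGetD answers i 0 = PySem.List.pyGetD ([2,1,2,3,2,4,2,5] : List Int) (PySem.Int.mod i 8) 0 then acc + 1 else acc)
      (g := fun acc i => if PySem.List.pyGetD answers i 0 = PySem.List.pyGetD ([3,3,1,1,2,2,4,4,5,5] : List Int) (PySem.Int.mod i 10) 0 then acc + 1 else acc)]
  dsimp only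
  rw [pvFoldA_eq [1,2,3,4,5] answers 5 rfl,
      pvFoldA_eq [2,1,2,3,2,4,2,5] answers 8 rfl,
      pvFoldA_eq [3,3,1,1,2,2,4,4,5,5] answers 10 rfl]
  simp only [pvChunkScore_eq [1,2,3,4,5] (by simp) (answers.length + 1) answers (by omega),
      pvChunkScore_eq [2,1,2,3,2,4,2,5] (by simp) (answers.length + 1) answers (by omega),
      pvChunkScore_eq [3,3,1,1,2,2,4,4,5,5] (by simp) (answers.length + 1) answers (by omega)]
  set s1 : Int := ((List.range answers.length).countP
      (fun j => decide (answers.getD j 0 = ([1,2,3,4,5] : List Int).getD (j % ([1,2,3,4,5] : List Int).length) 0)) : Int)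
  set s2 : Int := ((List.range answers.length).countP
      (fun j => decide (answers.getD j 0 = ([2,1,2,3,2,4,2,5] : List Int).getD (j % ([2,1,2,3,2,4,2,5] : List Int).length) 0)) : Int)
  set s3 : Int := ((List.range answers.length).countP
      (fun j => decide (answers.getD j 0 = ([3,3,1,1,2,2,4,4,5,5] : List Int).getD (j % ([3,3,1,1,2,2,4,4,5,5] : List Int).length) 0)) : Int)
  clear_value s1 s2 s3
  rw [show PySem.List.pyRange 0 3 1 = [0, 1, 2] from rfl, pvEnumerate_three]
  simp only [List.foldl_cons, List.foldl_nil,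
    pvGetD_three_zero, pvGetD_three_one, pvGetD_three_two]
  set m : Int := (PySem.List.max? [s1, s2, s3] fun x => x).getD 0
  clear_value m
  by_cases h1 : s1 = m <;> by_cases h2 : s2 = m <;> by_cases h3 : s3 = m <;>
    simp [h1, h2, h3, eq_comm]
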